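-- pv_equiv track=rewrite | github.com/diem/off-chain-reference | src/status_logic.py | filter_for_dependencies
-- ===== SOURCE A (Python) =====
-- def filter_for_dependencies(jointlattice, dependencies):
--     ''' Ensure cross process status dependencies are respected '''
--     lattice = set(jointlattice)
--     for (post_state, pre_state) in dependencies:
--         for item in list(lattice):
--             ((s0, s1), (e0, e1)) = item
--             if e0 == post_state and not s1 in pre_state:
--                 lattice.remove(item)
--             elif e1 == post_state and not s0 in pre_state:
--                 lattice.remove(item)
--     return lattice
-- ===== SOURCE B (Python) =====
-- def filter_for_dependencies(jointlattice, dependencies):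
--     ''' Ensure cross process status dependencies are respected '''
--     index = {}
--     for (post_state, pre_state) in dependencies:
--         index[post_state] = index.get(post_state, []) + [pre_state]
--     return {((s0, s1), (e0, e1))
--             for ((s0, s1), (e0, e1)) in jointlattice
--             if all(s1 in pre for pre in index.get(e0, []))
--             and all(s0 in pre for pre in index.get(e1, []))}
-- ===== Notes on version B (the rewrite author's own statement) =====
-- stated objective: alternative
-- what changed: Replaces the destructive dependency-by-dependency removal loop (re-scanning the whole lattice for every dependency) with a dict indexing pre-state lists by post_state built once, followed by a single filtering pass over the lattice items.
import Mathlib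
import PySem

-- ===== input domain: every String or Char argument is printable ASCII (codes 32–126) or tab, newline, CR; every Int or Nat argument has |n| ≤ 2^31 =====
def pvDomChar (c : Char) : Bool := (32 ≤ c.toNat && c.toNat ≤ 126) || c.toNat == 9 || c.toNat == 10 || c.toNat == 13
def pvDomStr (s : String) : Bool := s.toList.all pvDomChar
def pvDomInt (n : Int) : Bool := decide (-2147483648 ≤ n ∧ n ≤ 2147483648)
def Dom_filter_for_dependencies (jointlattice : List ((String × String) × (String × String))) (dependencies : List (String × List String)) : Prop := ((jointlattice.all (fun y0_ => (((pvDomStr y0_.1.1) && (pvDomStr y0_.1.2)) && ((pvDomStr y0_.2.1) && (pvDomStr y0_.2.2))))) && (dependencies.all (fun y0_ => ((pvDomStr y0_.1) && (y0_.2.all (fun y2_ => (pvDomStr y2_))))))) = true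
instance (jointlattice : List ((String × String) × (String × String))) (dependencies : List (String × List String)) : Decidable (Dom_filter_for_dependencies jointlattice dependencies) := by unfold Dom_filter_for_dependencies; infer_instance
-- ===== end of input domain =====

-- B replaces A's destructive per-dependency removal loop by a dict index of pre-state
-- lists keyed by post_state built once, followed by a single filtering pass (objective: alternative).
-- Both return Python sets; equality is about the set of kept items (PySem.Set, first-insertion order).

-- ===== PORT A =====
-- for (post_state, pre_state) in dependencies: for item in list(lattice): … lattice.remove(item)
def filter_for_dependencies (jointlattice : List ((String × String) × (String × String))) (dependencies : List (String × List String)) : List ((String × String) × (String × String)) :=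
  dependencies.foldl
    (fun lattice dep =>
      lattice.foldl
        (fun lat item =>
          if item.2.1 == dep.1 && !(dep.2.contains item.1.2) then PySem.Set.discard lat item
          else if item.2.2 == dep.1 && !(dep.2.contains item.1.1) then PySem.Set.discard lat item
          else lat)
        lattice)
    (PySem.Set.ofList jointlattice)

-- ===== PORT B =====
-- index[post_state] = index.get(post_state, []) + [pre_state]  (Dict.modify is exactly d[k] = f(d.get(k, dflt)))
def filter_for_dependencies_alt (jointlattice : List ((String × String) × (String × String))) (dependencies : List (String × List String)) : List ((String × String) × (String × String)) :=
  let index := dependencies.foldl (fun d p => d.modify p.1 [] (· ++ [p.2])) PySem.Dict.empty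
  PySem.Set.ofList (jointlattice.filter (fun item =>
    (index.getD item.2.1 []).all (fun pre => pre.contains item.1.2) &&
    (index.getD item.2.2 []).all (fun pre => pre.contains item.1.1)))

-- ===== PRECONDITION & SPEC =====
def Spec_filter_for_dependencies (jointlattice : List ((String × String) × (String × String))) (dependencies : List (String × List String)) (out : List ((String × String) × (String × String))) : Prop := out = filter_for_dependencies_alt jointlattice dependencies
instance (jointlattice : List ((String × String) × (String × String))) (dependencies : List (String × List String)) (out : List ((String × String) × (String × String))) : Decidable (Spec_filter_for_dependencies jointlattice dependencies out) := by unfold Spec_filter_for_dependencies; infer_instance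

-- ===== CLAIM (what is proved, stated in full; the proofs are below) =====
def Claim_equal_filter_for_dependencies : Prop := ∀ (jointlattice : List ((String × String) × (String × String))) (dependencies : List (String × List String)), Dom_filter_for_dependencies jointlattice dependencies → Spec_filter_for_dependencies jointlattice dependencies (filter_for_dependencies jointlattice dependencies)

-- ===== LEMMAS AND PROOFS =====

-- an item violates one dependency (A removes it iff this holds for some dependency)
def pvBad (dep : String × List String) (item : (String × String) × (String × String)) : Bool :=
  (item.2.1 == dep.1 && !(dep.2.contains item.1.2)) || (item.2.2 == dep.1 && !(dep.2.contains item.1.1))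

theorem pv_bool_both (a b x y : Bool) : ((a && x) && (b && y)) = ((!(!a || !b)) && (x && y)) := by
  cases a <;> cases b <;> cases x <;> cases y <;> rfl

theorem pv_bool_left (a x y : Bool) : ((a && x) && y) = ((!(!a)) && (x && y)) := by
  cases a <;> cases x <;> cases y <;> rfl

theorem pv_bool_right (b x y : Bool) : (x && (b && y)) = ((!(!b)) && (x && y)) := by
  cases b <;> cases x <;> cases y <;> rfl

-- A's inner loop over a snapshot l, removing from accumulator s
theorem pv_inner_fold (dep : String × List String)
    (l s : List ((String × String) × (String × String))) :
    l.foldl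
      (fun lat item =>
        if item.2.1 == dep.1 && !(dep.2.contains item.1.2) then PySem.Set.discard lat item
        else if item.2.2 == dep.1 && !(dep.2.contains item.1.1) then PySem.Set.discard lat item
        else lat)
      s
    = s.filter (fun y => !(pvBad dep y && l.contains y)) := by
  induction l generalizing s with
  | nil => simp
  | cons x xs ih =>
    simp only [List.foldl_cons, ih]
    by_cases hb : pvBad dep x = true
    · have hx : (if x.2.1 == dep.1 && !(dep.2.contains x.1.2) then PySem.Set.discard s x
          else if x.2.2 == dep.1 && !(dep.2.contains x.1.1) then PySem.Set.discard s x
          else s) = PySem.Set.discard s x := by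
        by_cases h1 : (x.2.1 == dep.1 && !(dep.2.contains x.1.2)) = true
        · rw [if_pos h1]
        · rw [if_neg h1]
          have h2 : (x.2.2 == dep.1 && !(dep.2.contains x.1.1)) = true := by
            unfold pvBad at hb
            rcases Bool.or_eq_true_iff.mp hb with h | h
            · exact absurd h h1
            · exact h
          rw [if_pos h2]
      rw [hx]
      show List.filter _ (List.filter _ s) = _
      rw [List.filter_filter]
      apply List.filter_congr
      intro y _
      by_cases hyx : y = x
      · subst hyx; simp [hb]
      · have hne : (y == x) = false := by rw [beq_eq_false_iff_ne]; exact hyx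
        simp [hyx, hne]
    · have hb' : pvBad dep x = false := Bool.not_eq_true _ ▸ eq_false_of_ne_true hb
      have hx : (if x.2.1 == dep.1 && !(dep.2.contains x.1.2) then PySem.Set.discard s x
          else if x.2.2 == dep.1 && !(dep.2.contains x.1.1) then PySem.Set.discard s x
          else s) = s := by
        unfold pvBad at hb'
        rcases Bool.or_eq_false_iff.mp hb' with ⟨hb1, hb2⟩
        rw [if_neg (by rw [hb1]; exact Bool.false_ne_true), if_neg (by rw [hb2]; exact Bool.false_ne_true)]
      rw [hx]
      apply List.filter_congr
      intro y _
      by_cases hyx : y = x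
      · subst hyx; simp [hb']
      · simp [hyx]

-- A's whole loop, from any starting set, is a filter by "no dependency is violated"
theorem pv_outer_fold (deps : List (String × List String))
    (s : List ((String × String) × (String × String))) :
    deps.foldl
      (fun lattice dep =>
        lattice.foldl
          (fun lat item =>
            if item.2.1 == dep.1 && !(dep.2.contains item.1.2) then PySem.Set.discard lat item
            else if item.2.2 == dep.1 && !(dep.2.contains item.1.1) then PySem.Set.discard lat item
            else lat)
          lattice)
      s
    = s.filter (fun y => deps.all (fun dep => !pvBad dep y)) := by
  induction deps generalizing s with
  | nil => simp
  | cons d ds ih =>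
    simp only [List.foldl_cons]
    rw [pv_inner_fold, ih]
    have hstep : s.filter (fun y => !(pvBad d y && s.contains y))
        = s.filter (fun y => !pvBad d y) := by
      apply List.filter_congr
      intro y hy
      have hc : s.contains y = true := List.contains_iff_mem.mpr hy
      rw [hc, Bool.and_true]
    rw [hstep, List.filter_filter]
    apply List.filter_congr
    intro y _
    simp [Bool.and_comm]

-- B's per-item test equals "no dependency is violated"
theorem pv_pred_eq (deps : List (String × List String))
    (item : (String × String) × (String × String)) :
    ((((deps.foldl (fun d p => d.modify p.1 [] (· ++ [p.2])) PySem.Dict.empty).getD item.2.1 []).all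
        (fun pre => pre.contains item.1.2)) &&
     (((deps.foldl (fun d p => d.modify p.1 [] (· ++ [p.2])) PySem.Dict.empty).getD item.2.2 []).all
        (fun pre => pre.contains item.1.1)))
    = deps.all (fun dep => !pvBad dep item) := by
  rw [PySem.Dict.getD_foldl_modify_append, PySem.Dict.getD_foldl_modify_append]
  simp only [PySem.Dict.getD_empty, List.nil_append]
  induction deps with
  | nil => simp
  | cons d ds ih =>
    simp only [List.filter_cons, List.all_cons]
    by_cases h0 : d.1 = item.2.1
    · have e0 : (item.2.1 == d.1) = true := by simp [h0]
      by_cases h1 : d.1 = item.2.2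
      · have e1 : (item.2.2 == d.1) = true := by simp [h1]
        rw [if_pos (by simp [h0]), if_pos (by simp [h1])]
        simp only [List.map_cons, List.all_cons]
        rw [← ih]
        simp only [pvBad, e0, e1, Bool.true_and]
        exact pv_bool_both _ _ _ _
      · have e1 : (item.2.2 == d.1) = false := by rw [beq_eq_false_iff_ne]; exact fun he => h1 he.symm
        rw [if_pos (by simp [h0]), if_neg (by simp [beq_iff_eq]; exact h1)]
        simp only [List.map_cons, List.all_cons]
        rw [← ih]
        simp only [pvBad, e0, e1, Bool.true_and, Bool.false_and, Bool.or_false]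
        exact pv_bool_left _ _ _
    · have e0 : (item.2.1 == d.1) = false := by rw [beq_eq_false_iff_ne]; exact fun he => h0 he.symm
      by_cases h1 : d.1 = item.2.2
      · have e1 : (item.2.2 == d.1) = true := by simp [h1]
        rw [if_neg (by simp [beq_iff_eq]; exact h0), if_pos (by simp [h1])]
        simp only [List.map_cons, List.all_cons]
        rw [← ih]
        simp only [pvBad, e0, e1, Bool.true_and, Bool.false_and, Bool.false_or]
        exact pv_bool_right _ _ _
      · have e1 : (item.2.2 == d.1) = false := by rw [beq_eq_false_iff_ne]; exact fun he => h1 he.symm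
        rw [if_neg (by simp [beq_iff_eq]; exact h0), if_neg (by simp [beq_iff_eq]; exact h1)]
        rw [← ih]
        simp only [pvBad, e0, e1, Bool.false_and, Bool.or_false, Bool.not_false, Bool.true_and]

-- set(filtered list) = filter of set(list)
theorem pv_ofList_filter (q : ((String × String) × (String × String)) → Bool)
    (l : List ((String × String) × (String × String))) :
    PySem.Set.ofList (l.filter q) = (PySem.Set.ofList l).filter q := by
  induction l with
  | nil => simp
  | cons x xs ih =>
    rw [List.filter_cons, PySem.Set.ofList_cons]
    by_cases hq : q x = true
    · rw [if_pos hq, PySem.Set.ofList_cons, ih]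
      show _ = List.filter q (x :: PySem.Set.discard (PySem.Set.ofList xs) x)
      rw [List.filter_cons, if_pos hq]
      congr 1
      show PySem.Set.discard (List.filter q (PySem.Set.ofList xs)) x = _
      simp only [PySem.Set.discard, List.filter_filter]
      congr 1
      funext y
      cases q y <;> simp
    · rw [if_neg hq, ih]
      show _ = List.filter q (x :: PySem.Set.discard (PySem.Set.ofList xs) x)
      rw [List.filter_cons, if_neg hq]
      show _ = List.filter q (List.filter _ (PySem.Set.ofList xs))
      rw [List.filter_filter]
      apply List.filter_congr
      intro y _
      by_cases hyx : y = x
      · subst hyx; simp [hq]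
      · simp [hyx]

-- ===== VERDICT (by name: the statement is the Claim_ definition above) =====
theorem filter_for_dependencies_spec : Claim_equal_filter_for_dependencies := by
  intro jl deps _
  unfold Spec_filter_for_dependencies filter_for_dependencies
  simp only [filter_for_dependencies_alt]
  rw [pv_outer_fold, pv_ofList_filter]
  congr 1
  funext item
  exact (pv_pred_eq deps item).symm
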